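-- pv_equiv track=rewrite | github.com/NeiderFajardo/ProblemasHackerRank | HackerRank/commondchild.py | contiene
-- ===== SOURCE A (Python) =====
-- def contiene(x, y):
--     i = 0
--     r = 0
--     while i <= len(x)-1:
--         j = 0
--         while j <= len(y)-1 and i <= len(x)-1:
--             if x[i] == y[j]:
--                 i += 1
--                 y = y[j+1:]
--                 j = 0
--                 r += 1
--             else:
--                 j += 1
--         i += 1
--     return r
-- ===== SOURCE B (Python) =====
-- def contiene(x, y):
--     n = len(y)
--     p = 0
--     r = 0
--     for c in x:
--         q = p
--         while q < n and y[q] != c: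
--             q += 1
--         if q < n:
--             p = q + 1
--             r += 1
--     return r
-- ===== Notes on version B (the rewrite author's own statement) =====
-- stated objective: faster
-- what changed: B replaces A's restarting nested index loops with repeated O(n) slicing of y by a single pass over x that advances a resume pointer into the unchanged y, so no slice copies are made.
import Mathlib
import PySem

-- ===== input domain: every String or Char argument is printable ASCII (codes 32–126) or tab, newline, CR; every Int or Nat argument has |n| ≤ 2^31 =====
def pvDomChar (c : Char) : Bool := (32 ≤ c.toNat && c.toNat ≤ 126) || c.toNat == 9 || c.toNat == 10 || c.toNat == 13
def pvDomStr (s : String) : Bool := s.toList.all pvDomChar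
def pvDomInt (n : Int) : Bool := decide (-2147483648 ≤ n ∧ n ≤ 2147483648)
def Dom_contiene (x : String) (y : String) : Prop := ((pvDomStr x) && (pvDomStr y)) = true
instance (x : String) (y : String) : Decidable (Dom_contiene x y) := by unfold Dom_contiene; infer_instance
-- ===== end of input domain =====

-- B replaces A's repeated slicing of y and nested index loops by a single pass over x
-- with a resume pointer into the unchanged y (objective: faster, constant-factor — no copies).


-- ===== PORT A =====
-- the two nested whiles, flattened: the else-branch is exactly the outer loop's
-- "i += 1; re-check i <= len(x)-1; j = 0" continuation
def contieneLoopA (x y : List Char) (i j r : Int) : Int :=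
  if _h : j ≤ (y.length : Int) - 1 ∧ i ≤ (x.length : Int) - 1 then
    if PySem.List.pyGet? x i = PySem.List.pyGet? y j then
      contieneLoopA x (PySem.List.slice y (some (j + 1)) none) (i + 1) 0 (r + 1)
    else
      contieneLoopA x y i (j + 1) r
  else
    if _h2 : i + 1 ≤ (x.length : Int) - 1 then contieneLoopA x y (i + 1) 0 r else r
termination_by (((x.length : Int) - i).toNat, ((y.length : Int) - j).toNat)
decreasing_by
  · apply Prod.Lex.left; omega
  · apply Prod.Lex.right; omega
  · apply Prod.Lex.left; omega

def contiene (x : String) (y : String) : Int :=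
  -- i = 0; r = 0; outer 'while i <= len(x)-1' guard, body = contieneLoopA
  if (0 : Int) ≤ (x.toList.length : Int) - 1 then contieneLoopA x.toList y.toList 0 0 0 else 0

-- ===== PORT B =====
-- inner 'while q < n and y[q] != c: q += 1'
def contieneScanB (y : List Char) (c : Char) (q : Nat) : Nat :=
  if h : q < y.length then
    if y[q] ≠ c then contieneScanB y c (q + 1) else q
  else q
termination_by y.length - q

-- 'for c in x' with state (p, r)
def contieneLoopB (y : List Char) (cs : List Char) (p : Nat) (r : Int) : Int :=
  match cs with
  | [] => r
  | c :: cs =>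
    let q := contieneScanB y c p
    if q < y.length then contieneLoopB y cs (q + 1) (r + 1) else contieneLoopB y cs p r

def contiene_alt (x : String) (y : String) : Int :=
  contieneLoopB y.toList x.toList 0 0

-- ===== PRECONDITION & SPEC =====
def Spec_contiene (x : String) (y : String) (out : Int) : Prop := out = contiene_alt x y
instance (x : String) (y : String) (out : Int) : Decidable (Spec_contiene x y out) := by unfold Spec_contiene; infer_instance

-- ===== CLAIM (what is proved, stated in full; the proofs are below) =====
def Claim_equal_contiene : Prop := ∀ (x : String) (y : String), Dom_contiene x y → Spec_contiene x y (contiene x y)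

-- ===== LEMMAS AND PROOFS =====

-- common greedy reference: consume cs in order, scanning the remaining suffix of y from j
def contieneG (cs y : List Char) (j : Nat) (r : Int) : Int :=
  match cs with
  | [] => r
  | c :: cs =>
    let q := contieneScanB y c j
    if q < y.length then contieneG cs (y.drop (q + 1)) 0 (r + 1) else contieneG cs y 0 r

theorem scanB_found (y : List Char) (c : Char) (q : Nat) (h : q < y.length) (he : y[q] = c) :
    contieneScanB y c q = q := by
  unfold contieneScanB; simp [h, he]

theorem scanB_step (y : List Char) (c : Char) (q : Nat) (h : q < y.length) (he : y[q] ≠ c) :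
    contieneScanB y c q = contieneScanB y c (q + 1) := by
  conv_lhs => rw [contieneScanB]
  simp [h, he]

theorem scanB_out (y : List Char) (c : Char) (q : Nat) (h : ¬ q < y.length) :
    contieneScanB y c q = q := by
  unfold contieneScanB; simp [h]

theorem scanB_shift (y : List Char) (c : Char) (p j : Nat) :
    contieneScanB y c (p + j) = p + contieneScanB (y.drop p) c j := by
  fun_induction contieneScanB (y.drop p) c j with
  | case1 j h he ih =>
    have hlen : p + j < y.length := by
      have := y.length_drop (i := p); omega
    have hg : y[p + j] ≠ c := by
      have : (y.drop p)[j] = y[p + j] := List.getElem_drop ..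
      rwa [this] at he
    rw [scanB_step y c (p + j) hlen hg]
    have : p + j + 1 = p + (j + 1) := by omega
    rw [this, ih]
  | case2 j h he =>
    have hlen : p + j < y.length := by
      have := y.length_drop (i := p); omega
    have hg : y[p + j] = c := by
      have : (y.drop p)[j] = y[p + j] := List.getElem_drop ..
      rw [this] at he; simpa using he
    rw [scanB_found y c (p + j) hlen hg]
  | case3 j h =>
    have hlen : ¬ p + j < y.length := by
      have := y.length_drop (i := p); omega
    rw [scanB_out y c (p + j) hlen]

theorem loopA_eq_G (x y : List Char) (i j r : Int) :
    0 ≤ i → 0 ≤ j → contieneLoopA x y i j r = contieneG (x.drop i.toNat) y j.toNat r := by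
  fun_induction contieneLoopA x y i j r with
  | case1 y i j r hg heq ih =>
    intro hi hj
    obtain ⟨hgj, hgi⟩ := hg
    have hi' : i.toNat < x.length := by omega
    have hj' : j.toNat < y.length := by omega
    rw [PySem.List.pyGet?_of_nonneg x hi, PySem.List.pyGet?_of_nonneg y hj,
        List.getElem?_eq_getElem hi', List.getElem?_eq_getElem hj'] at heq
    have hc : y[j.toNat] = x[i.toNat] := (Option.some.inj heq).symm
    rw [List.drop_eq_getElem_cons hi']
    simp only [contieneG]
    rw [scanB_found y _ j.toNat hj' hc, if_pos hj']
    rw [ih (by omega) le_rfl]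
    rw [PySem.List.slice_from y (show (0:Int) ≤ j + 1 by omega)]
    have e1 : (i + 1).toNat = i.toNat + 1 := by omega
    have e2 : (j + 1).toNat = j.toNat + 1 := by omega
    rw [e1, e2]
    rfl
  | case2 y i j r hg heq ih =>
    intro hi hj
    obtain ⟨hgj, hgi⟩ := hg
    have hi' : i.toNat < x.length := by omega
    have hj' : j.toNat < y.length := by omega
    rw [PySem.List.pyGet?_of_nonneg x hi, PySem.List.pyGet?_of_nonneg y hj,
        List.getElem?_eq_getElem hi', List.getElem?_eq_getElem hj'] at heq
    have hc : y[j.toNat] ≠ x[i.toNat] := fun h => heq (by rw [h])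
    rw [ih hi (by omega)]
    rw [List.drop_eq_getElem_cons hi']
    simp only [contieneG]
    rw [scanB_step y _ j.toNat hj' hc]
    have e2 : (j + 1).toNat = j.toNat + 1 := by omega
    rw [e2]
  | case3 y i j r hg h2 ih =>
    intro hi hj
    have hcase : i ≤ (x.length : Int) - 1 := by omega
    have hjout : ¬ (j ≤ (y.length : Int) - 1) := fun h => hg ⟨h, hcase⟩
    have hi' : i.toNat < x.length := by omega
    have hj' : ¬ j.toNat < y.length := by omega
    rw [ih (by omega) le_rfl]
    rw [List.drop_eq_getElem_cons hi']
    simp only [contieneG]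
    rw [scanB_out y _ j.toNat hj', if_neg hj']
    have e1 : (i + 1).toNat = i.toNat + 1 := by omega
    rw [e1]
    norm_num
  | case4 y i j r hg h2 =>
    intro hi hj
    by_cases hcase : i ≤ (x.length : Int) - 1
    · have hjout : ¬ (j ≤ (y.length : Int) - 1) := fun h => hg ⟨h, hcase⟩
      have hi' : i.toNat < x.length := by omega
      have hj' : ¬ j.toNat < y.length := by omega
      rw [List.drop_eq_getElem_cons hi']
      simp only [contieneG]
      rw [scanB_out y _ j.toNat hj', if_neg hj']
      have hnil : x.drop (i.toNat + 1) = [] := List.drop_eq_nil_of_le (by omega)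
      rw [hnil]
      rfl
    · have hnil : x.drop i.toNat = [] := List.drop_eq_nil_of_le (by omega)
      rw [hnil]
      rfl

theorem loopB_eq_G (y cs : List Char) (p : Nat) (r : Int) (hp : p ≤ y.length) :
    contieneLoopB y cs p r = contieneG cs (y.drop p) 0 r := by
  induction cs generalizing p r with
  | nil => rfl
  | cons c cs ih =>
    have hshift : contieneScanB y c p = p + contieneScanB (y.drop p) c 0 := by
      have := scanB_shift y c p 0; simpa using this
    simp only [contieneLoopB, contieneG, hshift]
    have hlen := y.length_drop (i := p)
    by_cases hq : contieneScanB (y.drop p) c 0 < (y.drop p).length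
    · have h1 : p + contieneScanB (y.drop p) c 0 < y.length := by omega
      rw [if_pos h1, if_pos hq, ih _ _ (by omega)]
      rw [List.drop_drop, Nat.add_assoc]
    · have h1 : ¬ p + contieneScanB (y.drop p) c 0 < y.length := by omega
      rw [if_neg h1, if_neg hq, ih _ _ hp]

-- ===== VERDICT (by name: the statement is the Claim_ definition above) =====
theorem contiene_spec : Claim_equal_contiene := by
  intro x y _
  unfold Spec_contiene contiene contiene_alt
  rw [loopB_eq_G _ _ _ _ (Nat.zero_le _)]
  simp only [List.drop_zero]
  split
  · rw [loopA_eq_G _ _ _ _ _ le_rfl le_rfl]; rfl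
  · have hx : x.toList = [] := by
      have : x.toList.length = 0 := by omega
      simpa using this
    rw [hx]; rfl
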